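-- pv_equiv track=rewrite | github.com/ui-insight/MindRouter | backend/app/core/latex_normalize.py | _is_inside_dollar
-- ===== SOURCE A (Python) =====
-- def _is_inside_dollar(text: str, pos: int) -> bool:
--     """Check if *pos* is inside an inline $…$ region (simple parity check)."""
--     count = 0
--     i = 0
--     while i < pos:
--         if text[i] == "$" and (i == 0 or text[i - 1] != "\\"):
--             count += 1
--         i += 1
--     return count % 2 == 1
-- ===== SOURCE B (Python) =====
-- def _is_inside_dollar(text: str, pos: int) -> bool:
--     """Parity of unescaped '$' in the prefix, via staged string transformations:
--     slice the prefix, delete every escaped dollar together with its backslash,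
--     then count the dollars that remain."""
--     prefix = text[:pos] if pos > 0 else ""
--     return prefix.replace("\\$", "").count("$") % 2 == 1
-- ===== Notes on version B (the rewrite author's own statement) =====
-- stated objective: faster
-- what changed: B replaces A's per-character Python counting loop by three staged whole-string operations: slice the prefix text[:pos], delete every escaped dollar with str.replace('\\$',''), and take the parity of str.count('$') on the result.
import Mathlib
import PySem

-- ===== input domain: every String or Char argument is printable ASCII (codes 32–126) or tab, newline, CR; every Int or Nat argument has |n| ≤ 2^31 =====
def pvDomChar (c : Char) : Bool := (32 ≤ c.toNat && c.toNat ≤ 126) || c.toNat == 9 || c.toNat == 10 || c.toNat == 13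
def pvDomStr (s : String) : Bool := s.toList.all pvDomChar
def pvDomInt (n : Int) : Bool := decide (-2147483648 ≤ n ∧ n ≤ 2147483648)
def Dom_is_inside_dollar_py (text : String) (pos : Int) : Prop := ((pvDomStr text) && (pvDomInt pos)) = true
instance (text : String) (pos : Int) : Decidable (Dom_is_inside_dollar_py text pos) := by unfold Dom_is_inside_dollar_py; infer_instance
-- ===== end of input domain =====

-- B computes the same parity by staged string operations (slice, replace "\$"->"", count "$") instead of A's per-character loop.
-- ===== PORT A =====
-- while i < pos: if text[i]=='$' and (i==0 or text[i-1]!='\\'): count += 1; i += 1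
def aGo (text : String) (pos : Int) : Nat → Int → Int → Int
  | 0, _, count => count
  | fuel+1, i, count =>
    if i < pos then
      let hit : Bool :=
        match PySem.Str.pyGet? text i with
        | some c => c == '$' &&
            (i == 0 ||
              (match PySem.Str.pyGet? text (i-1) with
               | some d => d != '\\'
               | none => false))   -- IndexError: unreachable inside Pre_
        | none => false            -- IndexError: unreachable inside Pre_
      aGo text pos fuel (i+1) (if hit then count + 1 else count)
    else count

def is_inside_dollar_py (text : String) (pos : Int) : Bool :=
  (aGo text pos pos.toNat 0 0) % 2 == 1

-- ===== PORT B =====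
-- prefix = text[:pos] if pos > 0 else ""; return prefix.replace("\\$", "").count("$") % 2 == 1
def is_inside_dollar_py_alt (text : String) (pos : Int) : Bool :=
  let pre := if pos > 0 then PySem.Str.slice text none (some pos) else ""
  (PySem.Str.count (PySem.Str.replace pre "\\$" "") "$") % 2 == 1

-- ===== PRECONDITION & SPEC =====
-- Pre_ excludes exactly pos > len(text), where A's text[i] raises IndexError.
def Pre_is_inside_dollar_py (text : String) (pos : Int) : Prop := pos ≤ (text.toList.length : Int)
instance (text : String) (pos : Int) : Decidable (Pre_is_inside_dollar_py text pos) := by unfold Pre_is_inside_dollar_py; infer_instance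
def pvWitness_is_inside_dollar_py : String × Int := ("a$b$c", 3)

def Spec_is_inside_dollar_py (text : String) (pos : Int) (out : Bool) : Prop := out = is_inside_dollar_py_alt text pos
instance (text : String) (pos : Int) (out : Bool) : Decidable (Spec_is_inside_dollar_py text pos out) := by unfold Spec_is_inside_dollar_py; infer_instance

-- ===== CLAIM (what is proved, stated in full; the proofs are below) =====
def Claim_equal_is_inside_dollar_py : Prop := ∀ (text : String) (pos : Int), Dom_is_inside_dollar_py text pos → Pre_is_inside_dollar_py text pos → Spec_is_inside_dollar_py text pos (is_inside_dollar_py text pos)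

-- ===== LEMMAS AND PROOFS =====
-- running parity state: udGo esc l = number of unescaped '$' in l, esc = "previous char was a backslash"
def udGo : Bool → List Char → Nat
  | _, [] => 0
  | esc, c :: t => (if c = '$' ∧ esc = false then 1 else 0) + udGo (c == '\\') t

lemma countGo_eq : ∀ (fuel : Nat) (l : List Char) (acc : Nat), l.length ≤ fuel →
    PySem.Chars.count.go ['$'] fuel l acc = acc + l.count '$' := by
  intro fuel
  induction fuel with
  | zero =>
    intro l acc h
    have : l = [] := List.eq_nil_of_length_eq_zero (by omega)
    subst this; simp [PySem.Chars.count.go]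
  | succ fuel ih =>
    intro l acc h
    cases l with
    | nil => simp [PySem.Chars.count.go]
    | cons c t =>
      have hred : PySem.Chars.count.go ['$'] (fuel+1) (c::t) acc =
          if List.isPrefixOf ['$'] (c::t) then PySem.Chars.count.go ['$'] fuel (List.drop 1 (c::t)) (acc+1)
          else PySem.Chars.count.go ['$'] fuel t acc := rfl
      rw [hred]
      have hlen : t.length ≤ fuel := by simp at h; omega
      by_cases hc : c = '$'
      · rw [if_pos (by simp [List.isPrefixOf, hc])]
        rw [show List.drop 1 (c::t) = t from rfl, ih t (acc+1) hlen]
        simp [List.count_cons, hc]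
        omega
      · rw [if_neg (by simp [List.isPrefixOf]; intro he; exact absurd he.symm hc)]
        rw [ih t acc hlen]
        simp [List.count_cons, hc]

lemma count_dollar (l : List Char) : PySem.Chars.count l ['$'] = l.count '$' := by
  unfold PySem.Chars.count
  rw [if_neg (by simp)]
  simpa using countGo_eq l.length l 0 le_rfl

lemma replaceGo_eq : ∀ (fuel : Nat) (l acc : List Char) (esc : Bool), l.length ≤ fuel →
    (esc = true → l.head? ≠ some '$') →
    (PySem.Chars.replace.go ['\\', '$'] [] fuel l acc).count '$' = acc.count '$' + udGo esc l := by
  intro fuel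
  induction fuel with
  | zero =>
    intro l acc esc h _
    have : l = [] := List.eq_nil_of_length_eq_zero (by omega)
    subst this
    simp [PySem.Chars.replace.go, udGo]
  | succ fuel ih =>
    intro l acc esc h hesc
    cases l with
    | nil => simp [PySem.Chars.replace.go, udGo]
    | cons c t =>
      have hred : PySem.Chars.replace.go ['\\','$'] [] (fuel+1) (c::t) acc =
          if List.isPrefixOf ['\\','$'] (c::t) then
            PySem.Chars.replace.go ['\\','$'] [] fuel (List.drop 2 (c::t)) (([] : List Char).reverse ++ acc)
          else PySem.Chars.replace.go ['\\','$'] [] fuel t (c::acc) := rfl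
      rw [hred]
      by_cases hp : List.isPrefixOf ['\\', '$'] (c :: t) = true
      · -- l = '\\' :: '$' :: t'
        cases t with
        | nil => simp [List.isPrefixOf] at hp
        | cons d t' =>
          simp only [List.isPrefixOf, Bool.and_eq_true, beq_iff_eq] at hp
          obtain ⟨hc, hd, -⟩ := hp
          subst hc; subst hd
          rw [if_pos (by simp [List.isPrefixOf])]
          rw [show List.drop 2 ('\\' :: '$' :: t') = t' from rfl]
          rw [show (([] : List Char).reverse ++ acc) = acc from by simp]
          rw [ih t' acc false (by simp at h ⊢; omega) (by simp)]
          simp [udGo]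
      · rw [if_neg hp]
        have hlen : t.length ≤ fuel := by simp at h; omega
        have hesc' : (c == '\\') = true → t.head? ≠ some '$' := by
          intro hcb ht
          apply hp
          cases t with
          | nil => simp at ht
          | cons d t' =>
            simp at ht hcb
            subst ht; subst hcb
            simp [List.isPrefixOf]
        rw [ih t (c :: acc) (c == '\\') hlen hesc']
        have hcase : (if c = '$' then (1:Nat) else 0) = (if c = '$' ∧ esc = false then 1 else 0) := by
          by_cases hc : c = '$'
          · have : esc = false := by
              cases esc with
              | false => rfl
              | true => exact absurd (by simp [hc]) (hesc rfl)
            simp [hc, this]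
          · simp [hc]
        simp only [udGo, List.count_cons]
        have : (if (c == '$') = true then (1:Nat) else 0) = (if c = '$' ∧ esc = false then 1 else 0) := by
          rw [← hcase]; by_cases hc : c = '$' <;> simp [hc]
        rw [this]
        omega

lemma replace_dollar (l : List Char) :
    (PySem.Chars.replace l ['\\', '$'] []).count '$' = udGo false l := by
  unfold PySem.Chars.replace
  rw [if_neg (by simp)]
  simpa using replaceGo_eq l.length l [] false le_rfl (by simp)

-- escape state at index i of the full text
def escAt (l : List Char) (i : Nat) : Bool :=
  if i = 0 then false else l[i-1]? == some '\\'

-- A's loop computes udGo over the prefix, starting at index i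
lemma aGo_eq (text : String) (pos : Int) (hpos : pos ≤ (text.toList.length : Int)) :
    ∀ (f i : Nat) (count : Int), (i + f : Nat) = pos.toNat →
    aGo text pos f (i : Int) count
      = count + (udGo (escAt text.toList i) ((text.toList.take pos.toNat).drop i) : Int) := by
  intro f
  induction f with
  | zero =>
    intro i count hif
    have hdrop : (text.toList.take pos.toNat).drop i = [] := by
      apply List.drop_eq_nil_of_le
      simpa using by omega
    simp [aGo, hdrop, udGo]
  | succ f ih =>
    intro i count hif
    set l := text.toList with hl
    have hi' : i < pos.toNat := by omega
    have hpos0 : 0 < pos := by omega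
    have hi : (i : Int) < pos := by omega
    have hilen : i < l.length := by omega
    have hget : PySem.Str.pyGet? text (i : Int) = some l[i] := by
      simp [hl, hilen]
    have hcons : (l.take pos.toNat).drop i = l[i] :: (l.take pos.toNat).drop (i+1) := by
      have h1 : i < (l.take pos.toNat).length := by simp; omega
      rw [List.drop_eq_getElem_cons h1]
      congr 1
      exact List.getElem_take
    have hhit : (match PySem.Str.pyGet? text (i : Int) with
        | some c => c == '$' &&
            ((i : Int) == 0 ||
              (match PySem.Str.pyGet? text ((i : Int)-1) with
               | some d => d != '\\'
               | none => false))
        | none => false) = (decide (l[i] = '$' ∧ escAt l i = false)) := by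
      rw [hget]
      by_cases hz : i = 0
      · subst hz
        simp only [escAt, if_pos rfl]
        by_cases hc : l[0] = '$' <;> simp [hc]
      · have h1 : ((i : Int) - 1) = ((i - 1 : Nat) : Int) := by omega
        have hi1 : i - 1 < l.length := by omega
        have hg : PySem.Str.pyGet? text ((i : Int) - 1) = some l[i-1] := by
          rw [h1]; simp [hl, hi1]
        rw [hg]
        have hz1 : ((i : Int) == 0) = false := by simp; omega
        simp only [escAt, if_neg hz, List.getElem?_eq_getElem hi1, hz1, Bool.false_or, bne]
        by_cases hc : l[i] = '$' <;> by_cases hb : l[i-1] = '\\' <;> simp [hc, hb]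
    show aGo text pos (f+1) (i : Int) count = _
    rw [aGo, if_pos hi]
    simp only [hhit]
    have hcast : ((i : Int) + 1) = ((i + 1 : Nat) : Int) := by push_cast; ring
    rw [hcast, ih (i+1) _ (by omega)]
    have hesc1 : escAt l (i+1) = (l[i] == '\\') := by
      simp [escAt, List.getElem?_eq_getElem hilen]
    rw [hcons]
    have hstep : udGo (escAt l i) (l[i] :: (l.take pos.toNat).drop (i+1))
        = (if l[i] = '$' ∧ escAt l i = false then 1 else 0)
          + udGo (l[i] == '\\') ((l.take pos.toNat).drop (i+1)) := rfl
    rw [hstep, ← hesc1]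
    by_cases hu : l[i] = '$' ∧ escAt l i = false
    · simp [hu]; push_cast; ring
    · simp [hu]

lemma natMod2_cast (n : Nat) : (((n : Int) % 2 == 1) : Bool) = ((n % 2 == 1) : Bool) := by
  have h : ((n : Int) % 2) = ((n % 2 : Nat) : Int) := by push_cast; ring_nf
  rw [h]
  rcases Nat.mod_two_eq_zero_or_one n with h2 | h2 <;> simp [h2]

-- ===== VERDICT (by name: the statement is the Claim_ definition above) =====
theorem is_inside_dollar_py_spec : Claim_equal_is_inside_dollar_py := by
  intro text pos _ hpre
  unfold Spec_is_inside_dollar_py is_inside_dollar_py is_inside_dollar_py_alt Pre_is_inside_dollar_py at *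
  by_cases hp : pos > 0
  · -- B side: slice = take pos.toNat, then replace/count on the char list
    rw [if_pos hp]
    show (aGo text pos pos.toNat 0 0 % 2 == 1)
      = (PySem.Str.count (PySem.Str.replace (PySem.Str.slice text none (some pos)) "\\$" "") "$" % 2 == 1)
    have hB : (PySem.Str.count (PySem.Str.replace (PySem.Str.slice text none (some pos)) "\\$" "") "$")
        = udGo false (text.toList.take pos.toNat) := by
      show PySem.Chars.count (PySem.Str.replace (PySem.Str.slice text none (some pos)) "\\$" "").toList ['$'] = _
      rw [count_dollar, PySem.Str.toList_replace]
      rw [show ("\\$").toList = ['\\', '$'] from rfl, show ("").toList = ([] : List Char) from rfl]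
      rw [PySem.Str.toList_slice]
      show (PySem.Chars.replace (PySem.List.slice text.toList none (some pos)) ['\\', '$'] []).count '$' = _
      rw [PySem.List.slice_to text.toList (by omega : (0:Int) ≤ pos)]
      exact replace_dollar _
    rw [hB]
    have hA : aGo text pos pos.toNat ((0 : Nat) : Int) 0
        = 0 + (udGo (escAt text.toList 0) ((text.toList.take pos.toNat).drop 0) : Int) :=
      aGo_eq text pos hpre pos.toNat 0 0 (by omega)
    simp only [Nat.cast_zero] at hA
    rw [hA]
    simp only [escAt, if_pos rfl, List.drop_zero, zero_add]
    exact natMod2_cast _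
  · -- pos ≤ 0: A's loop never runs, B's prefix is empty
    rw [if_neg hp]
    have h0 : pos.toNat = 0 := by omega
    rw [h0]
    simp [aGo]
    decide
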